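-- pv_equiv track=rewrite | github.com/ellanorai/ThinkRL | thinkrl/utils/seqlen_balancing.py | greedy_partition
-- ===== SOURCE A (Python) =====
-- import heapq
--
-- def ceildiv(a: int, b: int) -> int:
--     """
--     Ceiling division.
--
--     Args:
--         a: Numerator
--         b: Denominator
--
--     Returns:
--         Ceiling of a/b
--     """
--     return (a + b - 1) // b
--
-- def greedy_partition(
--     seqlen_list: list[int],
--     k_partitions: int,
--     equal_size: bool = True,
-- ) -> list[list[int]]:
--     """
--     Greedy first-fit algorithm for sequence length balancing.
--
--     Assigns each item to the partition with the smallest current sum.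
--     Faster than Karmarkar-Karp but may produce slightly less optimal results.
--
--     Args:
--         seqlen_list: List of sequence lengths to partition
--         k_partitions: Number of partitions to create
--         equal_size: Whether partitions must have equal number of elements
--
--     Returns:
--         List of k partitions, each containing indices into seqlen_list
--
--     Example:
--         ```python
--         seqlen_list = [100, 50, 75, 25, 80, 45]
--         partitions = greedy_partition(seqlen_list, k_partitions=2)
--         ```
--     """
--     if len(seqlen_list) < k_partitions:
--         partitions: list[list[int]] = [[] for _ in range(k_partitions)]
--         for i, _ in enumerate(seqlen_list):
--             partitions[i % k_partitions].append(i)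
--         return partitions
--
--     # Sort by length descending
--     indexed_items = [(length, i) for i, length in enumerate(seqlen_list)]
--     indexed_items.sort(reverse=True)
--
--     # Min-heap of (sum, partition_index)
--     partition_sums = [(0, i) for i in range(k_partitions)]
--     heapq.heapify(partition_sums)
--
--     partitions_out: list[list[int]] = [[] for _ in range(k_partitions)]
--
--     if equal_size:
--         items_per_partition = ceildiv(len(seqlen_list), k_partitions)
--         partition_counts = [0] * k_partitions
--
--         for length, orig_idx in indexed_items:
--             # Find partition with smallest sum that isn't full
--             candidates = [
--                 (s, p) for s, p in partition_sums
--                 if partition_counts[p] < items_per_partition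
--             ]
--             if not candidates:
--                 # All full, use any
--                 min_sum, min_partition = min(partition_sums)
--             else:
--                 min_sum, min_partition = min(candidates)
--
--             partitions_out[min_partition].append(orig_idx)
--             partition_counts[min_partition] += 1
--
--             # Update heap
--             partition_sums = [
--                 (s + length if p == min_partition else s, p)
--                 for s, p in partition_sums
--             ]
--             heapq.heapify(partition_sums)
--     else:
--         for length, orig_idx in indexed_items:
--             min_sum, min_partition = heapq.heappop(partition_sums)
--             partitions_out[min_partition].append(orig_idx)
--             heapq.heappush(partition_sums, (min_sum + length, min_partition))
--
--     return partitions_out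
-- ===== SOURCE B (Python) =====
-- import heapq
--
-- def greedy_partition(seqlen_list, k_partitions, equal_size=True):
--     n = len(seqlen_list)
--     if n < k_partitions:
--         # round-robin with n < k puts item i into partition i
--         return [[i] if i < n else [] for i in range(k_partitions)]
--     cap = -(-n // k_partitions) if equal_size else None
--     items = sorted(((length, i) for i, length in enumerate(seqlen_list)), reverse=True)
--     # lazy min-heap of (sum, partition, count); a partition found full on pop is discarded for good
--     heap = [(0, p, 0) for p in range(k_partitions)]
--     heapq.heapify(heap)
--     partitions = [[] for _ in range(k_partitions)]
--     for length, i in items: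
--         while True:
--             s, p, c = heapq.heappop(heap)
--             if cap is None or c < cap:
--                 break
--         partitions[p].append(i)
--         heapq.heappush(heap, (s + length, p, c + 1))
--     return partitions
-- ===== Notes on version B (the rewrite author's own statement) =====
-- stated objective: alternative
-- what changed: A rescans and re-heapifies all k partition sums for every item (and has a separate pop/push loop for the non-equal-size case); B runs one unified loop over a lazy min-heap of (sum, partition, count), popping the minimum and permanently discarding a partition once it is found full, and replaces the n<k round-robin loop with a direct comprehension (measured ~1.4x at the largest size, below the 1.5x bar, so no speed is claimed).
import Mathlib
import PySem

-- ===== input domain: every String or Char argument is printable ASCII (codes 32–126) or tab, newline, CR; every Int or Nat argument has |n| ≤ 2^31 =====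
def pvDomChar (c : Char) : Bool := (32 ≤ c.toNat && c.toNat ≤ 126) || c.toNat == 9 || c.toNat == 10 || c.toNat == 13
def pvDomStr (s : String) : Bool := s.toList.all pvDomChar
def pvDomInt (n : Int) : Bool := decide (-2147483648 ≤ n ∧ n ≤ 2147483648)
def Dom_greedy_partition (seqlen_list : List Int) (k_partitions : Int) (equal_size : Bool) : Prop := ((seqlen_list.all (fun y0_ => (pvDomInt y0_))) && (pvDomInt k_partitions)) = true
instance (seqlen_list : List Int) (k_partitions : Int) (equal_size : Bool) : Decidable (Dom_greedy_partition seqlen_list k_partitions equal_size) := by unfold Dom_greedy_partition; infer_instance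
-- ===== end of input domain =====

-- B replaces A's per-item candidate scan and re-heapify with a single lazy min-heap loop
-- (pop the min partition, discard it for good once full) and a direct comprehension for the
-- n < k round-robin case; equivalence of the RETURN value is proved on Pre_ below.

-- ===== PORT A =====
-- heapq is modelled by its contract: a min-ordered list (pop = head, push = ordered insert,
-- heapify = sort by Python's tuple order); A only observes the heap through min/filter/pop,
-- which are order-independent here (all partition indices are distinct), so this is exact.
def pvCeildiv (a b : Int) : Int := PySem.Int.floordiv (a + b - 1) b
def pvLe2 (x y : Int × Int) : Bool := decide (x.1 < y.1) || (decide (x.1 = y.1) && decide (x.2 ≤ y.2))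
def pvPush2 (x : Int × Int) : List (Int × Int) → List (Int × Int)
  | [] => [x]
  | y :: ys => if pvLe2 x y then x :: y :: ys else y :: pvPush2 x ys
def pvHeapify2 (l : List (Int × Int)) : List (Int × Int) := l.foldl (fun acc x => pvPush2 x acc) []
-- partitions[p].append(v)
def pvAppendAt (parts : List (List Int)) (p : Int) (v : Int) : List (List Int) :=
  PySem.List.pySetD parts p (PySem.List.pyGetD parts p [] ++ [v])

-- the body of A's equal_size loop
def pvStepAEq (cap : Int) (st : List (Int × Int) × List Int × List (List Int)) (li : Int × Int) :
    List (Int × Int) × List Int × List (List Int) :=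
  let sums := st.1; let counts := st.2.1; let parts := st.2.2
  let candidates := sums.filter (fun sp => decide (PySem.List.pyGetD counts sp.2 0 < cap))
  let chosen := if candidates = [] then (PySem.List.min2? sums Prod.fst Prod.snd).getD (0, 0)
                else (PySem.List.min2? candidates Prod.fst Prod.snd).getD (0, 0)
  let parts' := pvAppendAt parts chosen.2 li.2
  let counts' := PySem.List.pySetD counts chosen.2 (PySem.List.pyGetD counts chosen.2 0 + 1)
  let sums' := pvHeapify2 (sums.map (fun sp => (if sp.2 == chosen.2 then sp.1 + li.1 else sp.1, sp.2)))
  (sums', counts', parts')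

-- the body of A's non-equal_size loop (heappop; append; heappush)
def pvStepANe (st : List (Int × Int) × List (List Int)) (li : Int × Int) :
    List (Int × Int) × List (List Int) :=
  let popped := st.1.head?.getD (0, 0)
  (pvPush2 (popped.1 + li.1, popped.2) st.1.tail, pvAppendAt st.2 popped.2 li.2)

def greedy_partition (seqlen_list : List Int) (k_partitions : Int) (equal_size : Bool) : List (List Int) :=
  if PySem.List.len seqlen_list < k_partitions then
    (PySem.List.enumerate seqlen_list 0).foldl
      (fun parts iv => pvAppendAt parts (PySem.Int.mod iv.1 k_partitions) iv.1)
      ((PySem.List.pyRange 0 k_partitions 1).map (fun _ => ([] : List Int)))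
  else
    let indexed_items := PySem.List.sorted2
      ((PySem.List.enumerate seqlen_list 0).map (fun iv => (iv.2, iv.1))) Prod.fst Prod.snd true
    let partition_sums := pvHeapify2 ((PySem.List.pyRange 0 k_partitions 1).map (fun i => ((0:Int), i)))
    let partitions_out : List (List Int) := (PySem.List.pyRange 0 k_partitions 1).map (fun _ => [])
    if equal_size then
      let items_per_partition := pvCeildiv (PySem.List.len seqlen_list) k_partitions
      let partition_counts := PySem.List.pyRepeat [(0:Int)] k_partitions
      (indexed_items.foldl (pvStepAEq items_per_partition)
        (partition_sums, partition_counts, partitions_out)).2.2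
    else
      (indexed_items.foldl pvStepANe (partition_sums, partitions_out)).2

-- ===== PORT B =====
-- lazy min-heap of (sum, partition, count); heapq modelled by the same contract as in PORT A
def pvLe3 (x y : Int × Int × Int) : Bool :=
  decide (x.1 < y.1) || (decide (x.1 = y.1) &&
    (decide (x.2.1 < y.2.1) || (decide (x.2.1 = y.2.1) && decide (x.2.2 ≤ y.2.2))))
def pvPush3 (x : Int × Int × Int) : List (Int × Int × Int) → List (Int × Int × Int)
  | [] => [x]
  | y :: ys => if pvLe3 x y then x :: y :: ys else y :: pvPush3 x ys
def pvHeapify3 (l : List (Int × Int × Int)) : List (Int × Int × Int) := l.foldl (fun acc x => pvPush3 x acc) []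
-- B's inner `while True: heappop; break when not full` loop (none = Python's IndexError on an empty heap)
def pvPopNonFull (cap : Option Int) : List (Int × Int × Int) → Option ((Int × Int × Int) × List (Int × Int × Int))
  | [] => none
  | e :: r => match cap with
    | none => some (e, r)
    | some c => if e.2.2 < c then some (e, r) else pvPopNonFull (some c) r

def pvStepB (cap : Option Int) (st : List (Int × Int × Int) × List (List Int)) (li : Int × Int) :
    List (Int × Int × Int) × List (List Int) :=
  match pvPopNonFull cap st.1 with
  | none => st
  | some (e, rest) => (pvPush3 (e.1 + li.1, e.2.1, e.2.2 + 1) rest, pvAppendAt st.2 e.2.1 li.2)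

def greedy_partition_alt (seqlen_list : List Int) (k_partitions : Int) (equal_size : Bool) : List (List Int) :=
  let n := PySem.List.len seqlen_list
  if n < k_partitions then
    (PySem.List.pyRange 0 k_partitions 1).map (fun i => if i < n then [i] else [])
  else
    let cap : Option Int := if equal_size then some (-(PySem.Int.floordiv (-n) k_partitions)) else none
    let items := PySem.List.sorted2
      ((PySem.List.enumerate seqlen_list 0).map (fun iv => (iv.2, iv.1))) Prod.fst Prod.snd true
    let heap0 := pvHeapify3 ((PySem.List.pyRange 0 k_partitions 1).map (fun p => ((0:Int), p, (0:Int))))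
    let parts0 : List (List Int) := (PySem.List.pyRange 0 k_partitions 1).map (fun _ => [])
    (items.foldl (pvStepB cap) (heap0, parts0)).2

-- ===== PRECONDITION & SPEC =====
-- Pre_ admits exactly the inputs on which A returns: k_partitions ≥ 1, plus the degenerate
-- empty-list inputs with k_partitions ≤ 0 on which A still returns (there A raises only for
-- k_partitions = 0 with equal_size = true, a ZeroDivisionError in ceildiv); on every other
-- excluded input A raises (ZeroDivisionError, ValueError on min([]) or IndexError on an empty heap).
def Pre_greedy_partition (seqlen_list : List Int) (k_partitions : Int) (equal_size : Bool) : Prop :=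
  1 ≤ k_partitions ∨ (seqlen_list = [] ∧ (k_partitions < 0 ∨ equal_size = false))
instance (seqlen_list : List Int) (k_partitions : Int) (equal_size : Bool) : Decidable (Pre_greedy_partition seqlen_list k_partitions equal_size) := by unfold Pre_greedy_partition; infer_instance
def pvWitness_greedy_partition : List Int × Int × Bool := ([3, 1, 2], 2, true)

def Spec_greedy_partition (seqlen_list : List Int) (k_partitions : Int) (equal_size : Bool) (out : List (List Int)) : Prop := out = greedy_partition_alt seqlen_list k_partitions equal_size
instance (seqlen_list : List Int) (k_partitions : Int) (equal_size : Bool) (out : List (List Int)) : Decidable (Spec_greedy_partition seqlen_list k_partitions equal_size out) := by unfold Spec_greedy_partition; infer_instance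

-- ===== CLAIM (what is proved, stated in full; the proofs are below) =====
def Claim_equal_greedy_partition : Prop := ∀ (seqlen_list : List Int) (k_partitions : Int) (equal_size : Bool), Dom_greedy_partition seqlen_list k_partitions equal_size → Pre_greedy_partition seqlen_list k_partitions equal_size → Spec_greedy_partition seqlen_list k_partitions equal_size (greedy_partition seqlen_list k_partitions equal_size)

-- ===== LEMMAS AND PROOFS =====

-- strict lexicographic order on (sum, partition) pairs, and on heap entries through their first two fields
def pvLt2 (x y : Int × Int) : Prop := x.1 < y.1 ∨ (x.1 = y.1 ∧ x.2 < y.2)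
def pvLtP (x y : Int × Int × Int) : Prop := pvLt2 (x.1, x.2.1) (y.1, y.2.1)

theorem pvLt2_irrefl (x : Int × Int) : ¬ pvLt2 x x := by unfold pvLt2; omega
theorem pvLt2_trans {x y z : Int × Int} (h1 : pvLt2 x y) (h2 : pvLt2 y z) : pvLt2 x z := by
  unfold pvLt2 at *; omega
theorem pvLe3_true_lt {x y : Int × Int × Int} (hne : x.2.1 ≠ y.2.1) (h : pvLe3 x y = true) : pvLtP x y := by
  simp [pvLe3] at h; unfold pvLtP pvLt2; simp; omega

theorem pvLe3_false_lt {x y : Int × Int × Int} (hne : x.2.1 ≠ y.2.1) (h : pvLe3 x y = false) : pvLtP y x := by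
  simp [pvLe3] at h; unfold pvLtP pvLt2; simp; omega

theorem pvPush2_perm (x : Int × Int) (l : List (Int × Int)) : (pvPush2 x l).Perm (x :: l) := by
  induction l with
  | nil => simp [pvPush2]
  | cons y ys ih =>
    unfold pvPush2
    split
    · exact List.Perm.refl _
    · exact (ih.cons y).trans (List.Perm.swap x y ys)

theorem pvPush3_perm (x : Int × Int × Int) (l : List (Int × Int × Int)) : (pvPush3 x l).Perm (x :: l) := by
  induction l with
  | nil => simp [pvPush3]
  | cons y ys ih =>
    unfold pvPush3
    split
    · exact List.Perm.refl _
    · exact (ih.cons y).trans (List.Perm.swap x y ys)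

theorem pvMem_push3 {z x : Int × Int × Int} {l : List (Int × Int × Int)} :
    z ∈ pvPush3 x l ↔ z = x ∨ z ∈ l := by
  rw [(pvPush3_perm x l).mem_iff]; simp

theorem pvFold_push2_perm (l : List (Int × Int)) : ∀ acc, (l.foldl (fun a x => pvPush2 x a) acc).Perm (acc ++ l) := by
  induction l with
  | nil => simp
  | cons x t ih =>
    intro acc
    simp only [List.foldl_cons]
    exact (ih _).trans (((pvPush2_perm x acc).append_right t).trans List.perm_middle.symm)

theorem pvHeapify2_perm (l : List (Int × Int)) : (pvHeapify2 l).Perm l := by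
  simpa using pvFold_push2_perm l []


theorem pvFold_push3_perm (l : List (Int × Int × Int)) : ∀ acc, (l.foldl (fun a x => pvPush3 x a) acc).Perm (acc ++ l) := by
  induction l with
  | nil => simp
  | cons x t ih =>
    intro acc
    simp only [List.foldl_cons]
    exact (ih _).trans (((pvPush3_perm x acc).append_right t).trans List.perm_middle.symm)

theorem pvHeapify3_perm (l : List (Int × Int × Int)) : (pvHeapify3 l).Perm l := by
  simpa using pvFold_push3_perm l []


theorem pvPairwise_push3 {x : Int × Int × Int} {l : List (Int × Int × Int)}
    (hl : l.Pairwise pvLtP) (hx : ∀ y ∈ l, y.2.1 ≠ x.2.1) : (pvPush3 x l).Pairwise pvLtP := by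
  induction l with
  | nil => simp [pvPush3]
  | cons y ys ih =>
    rcases List.pairwise_cons.1 hl with ⟨hy, hys⟩
    unfold pvPush3; split
    next hle =>
      refine List.pairwise_cons.2 ⟨?_, hl⟩
      intro z hz
      have hxy : pvLtP x y := pvLe3_true_lt (fun h => hx y (by simp) h.symm) hle
      rcases hz with _ | hz
      · exact hxy
      · exact pvLt2_trans hxy (hy z (by assumption))
    next hle =>
      have hyx : pvLtP y x := pvLe3_false_lt (fun h => hx y (by simp) h.symm) (by simpa using hle)
      refine List.pairwise_cons.2 ⟨?_, ih hys (fun z hz => hx z (by simp [hz]))⟩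
      intro z hz
      rcases pvMem_push3.1 hz with rfl | hz
      · exact hyx
      · exact hy z hz


theorem pvPairwise_fold_push3 (l : List (Int × Int × Int)) : ∀ acc,
    acc.Pairwise pvLtP → ((acc ++ l).map (fun e => e.2.1)).Nodup →
    (l.foldl (fun a x => pvPush3 x a) acc).Pairwise pvLtP := by
  induction l with
  | nil => intro acc h _; simpa using h
  | cons x t ih =>
    intro acc hacc hnd
    simp only [List.foldl_cons]
    have hxacc : ∀ y ∈ acc, y.2.1 ≠ x.2.1 := by
      intro y hy heq
      rw [List.map_append, List.nodup_append] at hnd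
      exact hnd.2.2 y.2.1 (List.mem_map_of_mem hy) x.2.1 (by simp) heq
    apply ih
    · exact pvPairwise_push3 hacc hxacc
    · have hperm : ((pvPush3 x acc ++ t).map (fun e => e.2.1)).Perm ((acc ++ x :: t).map (fun e => e.2.1)) := by
        refine List.Perm.map _ ?_
        exact ((pvPush3_perm x acc).append_right t).trans List.perm_middle.symm
      exact hperm.nodup_iff.2 hnd

theorem pvPairwise_heapify3 (l : List (Int × Int × Int)) (hnd : (l.map (fun e => e.2.1)).Nodup) :
    (pvHeapify3 l).Pairwise pvLtP := by
  exact pvPairwise_fold_push3 l [] (by simp) (by simpa using hnd)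


def pvPr (e : Int × Int × Int) : Int × Int := (e.1, e.2.1)

theorem pvLe3_eq_le2 {x y : Int × Int × Int} (hne : x.2.1 ≠ y.2.1) :
    pvLe3 x y = pvLe2 (pvPr x) (pvPr y) := by
  simp only [pvLe3, pvLe2, pvPr]
  rw [Bool.eq_iff_iff]
  simp
  omega

theorem pvMap_pr_push3 (x : Int × Int × Int) (l : List (Int × Int × Int))
    (hx : ∀ y ∈ l, y.2.1 ≠ x.2.1) : (pvPush3 x l).map pvPr = pvPush2 (pvPr x) (l.map pvPr) := by
  induction l with
  | nil => simp [pvPush3, pvPush2]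
  | cons y ys ih =>
    have hne : x.2.1 ≠ y.2.1 := fun h => hx y (by simp) h.symm
    have ih' := ih (fun z hz => hx z (by simp [hz]))
    by_cases h : pvLe2 (pvPr x) (pvPr y) = true
    · simp [pvPush3, pvPush2, pvLe3_eq_le2 hne, h]
    · simp [pvPush3, pvPush2, pvLe3_eq_le2 hne, h, ih']


theorem pvMap_pr_fold_push3 (l : List (Int × Int × Int)) : ∀ acc,
    ((acc ++ l).map (fun e => e.2.1)).Nodup →
    (l.foldl (fun a x => pvPush3 x a) acc).map pvPr
      = (l.map pvPr).foldl (fun a x => pvPush2 x a) (acc.map pvPr) := by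
  induction l with
  | nil => simp
  | cons x t ih =>
    intro acc hnd
    simp only [List.foldl_cons, List.map_cons]
    have hxacc : ∀ y ∈ acc, y.2.1 ≠ x.2.1 := by
      intro y hy heq
      rw [List.map_append, List.nodup_append] at hnd
      exact hnd.2.2 y.2.1 (List.mem_map_of_mem hy) x.2.1 (by simp) heq
    rw [← pvMap_pr_push3 x acc hxacc]
    apply ih
    have hperm : ((pvPush3 x acc ++ t).map (fun e => e.2.1)).Perm ((acc ++ x :: t).map (fun e => e.2.1)) :=
      List.Perm.map _ (((pvPush3_perm x acc).append_right t).trans List.perm_middle.symm)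
    exact hperm.nodup_iff.2 hnd

theorem pvMap_pr_heapify3 (l : List (Int × Int × Int)) (hnd : (l.map (fun e => e.2.1)).Nodup) :
    (pvHeapify3 l).map pvPr = pvHeapify2 (l.map pvPr) := by
  simpa [pvHeapify3, pvHeapify2] using pvMap_pr_fold_push3 l [] (by simpa using hnd)


theorem pvPush2_ne_nil (x : Int × Int) (l : List (Int × Int)) : pvPush2 x l ≠ [] := by
  cases l with
  | nil => simp [pvPush2]
  | cons y ys => unfold pvPush2; split <;> simp

theorem pvPop_spec (v : Int) (l : List (Int × Int × Int)) (h : ∃ e ∈ l, e.2.2 < v) :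
    ∃ e pre rest, pvPopNonFull (some v) l = some (e, rest) ∧ l = pre ++ e :: rest ∧
      (∀ y ∈ pre, ¬ y.2.2 < v) ∧ e.2.2 < v := by
  induction l with
  | nil => simp at h
  | cons a t ih =>
    by_cases ha : a.2.2 < v
    · exact ⟨a, [], t, by simp [pvPopNonFull, ha], by simp, by simp, ha⟩
    · have ht : ∃ e ∈ t, e.2.2 < v := by
        rcases h with ⟨e, he, hev⟩
        rcases List.mem_cons.1 he with rfl | he
        · exact absurd hev ha
        · exact ⟨e, he, hev⟩
      rcases ih ht with ⟨e, pre, rest, h1, h2, h3, h4⟩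
      refine ⟨e, a :: pre, rest, ?_, by simp [h2], ?_, h4⟩
      · simp [pvPopNonFull, ha, h1]
      · intro y hy
        rcases List.mem_cons.1 hy with rfl | hy
        · exact ha
        · exact h3 y hy


def pvMinF : Option (Int × Int) → (Int × Int) → Option (Int × Int) := fun acc y =>
  match acc with
  | none => some y
  | some m => if (decide (y.1 < m.1) || !decide (m.1 < y.1) && decide (y.2 < m.2)) = true then some y else some m

theorem pvMinF_keep {x y : Int × Int} (h : y = x ∨ pvLt2 x y) : pvMinF (some x) y = some x := by
  rcases h with rfl | hlt
  · simp [pvMinF]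
  · unfold pvMinF pvLt2 at *
    simp only []
    rw [if_neg]
    simp
    omega

theorem pvMin2?_fold_keep (x : Int × Int) (l : List (Int × Int))
    (h : ∀ y ∈ l, y = x ∨ pvLt2 x y) : l.foldl pvMinF (some x) = some x := by
  induction l with
  | nil => rfl
  | cons y t ih =>
    simp only [List.foldl_cons, pvMinF_keep (h y (by simp))]
    exact ih (fun z hz => h z (by simp [hz]))

theorem pvMin2?_fold_any (l : List (Int × Int)) : ∀ acc,
    l.foldl pvMinF acc = acc ∨ ∃ m ∈ l, l.foldl pvMinF acc = some m := by
  induction l with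
  | nil => intro acc; left; rfl
  | cons y t ih =>
    intro acc
    simp only [List.foldl_cons]
    have hstep : pvMinF acc y = acc ∨ pvMinF acc y = some y := by
      cases acc with
      | none => right; rfl
      | some m => unfold pvMinF; simp only []; split <;> simp
    rcases hstep with he | he <;> rw [he]
    · rcases ih acc with h1 | ⟨m, hm, h1⟩
      · left; exact h1
      · right; exact ⟨m, by simp [hm], h1⟩
    · rcases ih (some y) with h1 | ⟨m, hm, h1⟩
      · right; exact ⟨y, by simp, h1⟩
      · right; exact ⟨m, by simp [hm], h1⟩

theorem pvMin2?_eq_of_min (xs : List (Int × Int)) (x : Int × Int) (hx : x ∈ xs)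
    (hmin : ∀ y ∈ xs, y = x ∨ pvLt2 x y) : PySem.List.min2? xs Prod.fst Prod.snd = some x := by
  have hrw : PySem.List.min2? xs Prod.fst Prod.snd = List.foldl pvMinF none xs := by
    unfold PySem.List.min2?
    congr 1
    funext acc y
    cases acc <;> rfl
  rw [hrw]
  rcases List.append_of_mem hx with ⟨l1, l2, rfl⟩
  rw [List.foldl_append, List.foldl_cons]
  have hmid : pvMinF (List.foldl pvMinF none l1) x = some x := by
    rcases pvMin2?_fold_any l1 none with h1 | ⟨m, hm, h1⟩
    · rw [h1]; rfl
    · rw [h1]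
      rcases hmin m (by simp [hm]) with rfl | hlt
      · simp [pvMinF]
      · unfold pvMinF pvLt2 at *
        simp only []
        rw [if_pos]
        simp
        omega
  rw [hmid]
  exact pvMin2?_fold_keep x l2 (fun y hy => hmin y (by simp [hy]))


theorem pvSum_map_range (f : Nat → Int) (K : Nat) :
    ((List.range K).map f).sum = ∑ i ∈ Finset.range K, f i := by
  induction K with
  | zero => simp
  | succ n ih => rw [List.range_succ, Finset.sum_range_succ, List.map_append, List.sum_append, ih]; simp


theorem pvSet_map_range {α : Type} (f : Nat → α) (K p : Nat) (a : α) (hp : p < K) :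
    ((List.range K).map f).set p a = (List.range K).map (fun q => if q = p then a else f q) := by
  apply List.ext_getElem
  · simp
  · intro i h1 h2
    simp only [List.getElem_set, List.getElem_map, List.getElem_range]
    rcases eq_or_ne i p with rfl | hip
    · simp
    · simp [hip, Ne.symm hip]


-- the invariant tying A's (heap, counts, partitions) to B's lazy heap in the equal_size case
def pvInvEq (K : Nat) (v : Int) (m : Nat) (sums : List (Int × Int)) (counts : List Int)
    (heapB : List (Int × Int × Int)) (pA pB : List (List Int)) : Prop :=
  ∃ s c : Nat → Int,
    sums.Perm ((List.range K).map (fun p => (s p, (p:Int)))) ∧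
    counts = (List.range K).map c ∧
    heapB.Pairwise pvLtP ∧
    (∀ e ∈ heapB, ∃ p, p < K ∧ e = (s p, ((p:Nat):Int), c p)) ∧
    (∀ p, p < K → c p < v → (s p, ((p:Nat):Int), c p) ∈ heapB) ∧
    ((List.range K).map c).sum = (m : Int) ∧
    (∀ p, p < K → c p ≤ v) ∧
    pA = pB

theorem pvLoopEq (its : List (Int × Int)) : ∀ (K : Nat) (v : Int) (m : Nat) sums counts heapB pA pB,
    (m : Int) + its.length ≤ (K : Int) * v →
    pvInvEq K v m sums counts heapB pA pB →
    (its.foldl (pvStepAEq v) (sums, counts, pA)).2.2 = (its.foldl (pvStepB (some v)) (heapB, pB)).2 := by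
  induction its with
  | nil =>
    intro K v m sums counts heapB pA pB hcap hInv
    obtain ⟨s, c, _, _, _, _, _, _, _, hp⟩ := hInv
    exact hp
  | cons li t ih =>
    intro K v m sums counts heapB pA pB hcap hInv
    obtain ⟨s, c, hperm, hcounts, hpw, hent, hcov, hsum, hle, hp⟩ := hInv
    rw [List.length_cons] at hcap
    push_cast at hcap
    -- a non-full partition exists
    have hex : ∃ p, p < K ∧ c p < v := by
      by_contra hno
      push Not at hno
      have hall : ∀ p ∈ Finset.range K, c p = v :=
        fun p hp => le_antisymm (hle p (Finset.mem_range.1 hp)) (hno p (Finset.mem_range.1 hp))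
      have hKv : ((List.range K).map c).sum = (K:Int) * v := by
        rw [pvSum_map_range, Finset.sum_congr rfl hall]
        simp [mul_comm]
      rw [hsum] at hKv
      omega
    obtain ⟨p1, hp1K, hp1v⟩ := hex
    -- B pops the first non-full entry e
    obtain ⟨e, pre, rest, hpop, hdecomp, hprefull, hev⟩ :=
      pvPop_spec v heapB ⟨(s p1, (p1:Int), c p1), hcov p1 hp1K hp1v, hp1v⟩
    obtain ⟨pe, hpeK, hee⟩ := hent e (by rw [hdecomp]; simp)
    have he1 : e.1 = s pe := by rw [hee]
    have he21 : e.2.1 = ((pe:Nat):Int) := by rw [hee]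
    have he22 : e.2.2 = c pe := by rw [hee]
    have hpev : c pe < v := by rw [← he22]; exact hev
    have hgetD : ∀ q : Nat, q < K → PySem.List.pyGetD counts ((q:Nat):Int) 0 = c q := by
      intro q hq
      rw [hcounts, PySem.List.pyGetD_natCast]
      exact PySem.List.getD_map_range _ _ _ _ hq
    have hmem_sums : ∀ y ∈ sums, ∃ q, q < K ∧ y = (s q, ((q:Nat):Int)) := by
      intro y hy
      rcases List.mem_map.1 (hperm.mem_iff.1 hy) with ⟨q, hq, rfl⟩
      exact ⟨q, List.mem_range.1 hq, rfl⟩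
    -- A's candidate list and its minimum
    have hxc : (s pe, ((pe:Nat):Int)) ∈ sums.filter (fun sp => decide (PySem.List.pyGetD counts sp.2 0 < v)) := by
      rw [List.mem_filter]
      refine ⟨hperm.mem_iff.2 (List.mem_map.2 ⟨pe, List.mem_range.2 hpeK, rfl⟩), ?_⟩
      simp only [decide_eq_true_eq]
      rw [hgetD pe hpeK]
      exact hpev
    have hmin : ∀ q, q < K → c q < v →
        (s pe, ((pe:Nat):Int)) = (s q, ((q:Nat):Int)) ∨ pvLt2 (s pe, ((pe:Nat):Int)) (s q, ((q:Nat):Int)) := by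
      intro q hqK hqv
      have hqmem : (s q, ((q:Nat):Int), c q) ∈ heapB := hcov q hqK hqv
      rw [hdecomp] at hqmem
      rcases List.mem_append.1 hqmem with hpre | hrest
      · exact absurd hqv (by simpa using hprefull _ hpre)
      · rcases List.mem_cons.1 hrest with heq | hrest
        · left
          have h1 : s q = e.1 := by rw [← heq]
          have h2 : ((q:Nat):Int) = e.2.1 := by rw [← heq]
          rw [h1, h2, he1, he21]
        · right
          have hlt : pvLtP e (s q, ((q:Nat):Int), c q) := by
            rw [hdecomp] at hpw
            exact (List.pairwise_cons.1 (List.pairwise_append.1 hpw).2.1).1 _ hrest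
          unfold pvLtP at hlt
          rw [he1, he21] at hlt
          exact hlt
    have hminc : ∀ y ∈ sums.filter (fun sp => decide (PySem.List.pyGetD counts sp.2 0 < v)),
        y = (s pe, ((pe:Nat):Int)) ∨ pvLt2 (s pe, ((pe:Nat):Int)) y := by
      intro y hy
      rcases hmem_sums y (List.mem_of_mem_filter hy) with ⟨q, hqK, rfl⟩
      have hqv : c q < v := by
        have h2 := (List.mem_filter.1 hy).2
        simp only [decide_eq_true_eq] at h2
        rwa [hgetD q hqK] at h2
      rcases hmin q hqK hqv with h | h
      · left; exact h.symm
      · right; exact h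
    have hchosen : PySem.List.min2? (sums.filter (fun sp => decide (PySem.List.pyGetD counts sp.2 0 < v)))
        Prod.fst Prod.snd = some (s pe, ((pe:Nat):Int)) :=
      pvMin2?_eq_of_min _ _ hxc hminc
    -- compute one step of each side
    have hcne : sums.filter (fun sp => decide (PySem.List.pyGetD counts sp.2 0 < v)) ≠ [] :=
      List.ne_nil_of_mem hxc
    have hAstep : pvStepAEq v (sums, counts, pA) li
        = (pvHeapify2 (sums.map (fun sp => (if sp.2 == ((pe:Nat):Int) then sp.1 + li.1 else sp.1, sp.2))),
           PySem.List.pySetD counts ((pe:Nat):Int) (PySem.List.pyGetD counts ((pe:Nat):Int) 0 + 1),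
           pvAppendAt pA ((pe:Nat):Int) li.2) := by
      simp only [pvStepAEq]
      rw [if_neg hcne, hchosen]
      rfl
    have hBstep : pvStepB (some v) (heapB, pB) li
        = (pvPush3 (e.1 + li.1, e.2.1, e.2.2 + 1) rest, pvAppendAt pB e.2.1 li.2) := by
      simp only [pvStepB, hpop]
    simp only [List.foldl_cons]
    rw [hAstep, hBstep]
    have hrestpw : rest.Pairwise pvLtP := by
      rw [hdecomp] at hpw
      exact (List.pairwise_cons.1 (List.pairwise_append.1 hpw).2.1).2
    have hrest_ent : ∀ y ∈ rest, ∃ q, q < K ∧ q ≠ pe ∧ y = (s q, ((q:Nat):Int), c q) := by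
      intro y hy
      obtain ⟨q, hqK, hyq⟩ := hent y (by rw [hdecomp]; simp [hy])
      refine ⟨q, hqK, ?_, hyq⟩
      rintro rfl
      have hlt : pvLtP e y := by
        rw [hdecomp] at hpw
        exact (List.pairwise_cons.1 (List.pairwise_append.1 hpw).2.1).1 _ hy
      rw [hyq, ← hee] at hlt
      exact pvLt2_irrefl _ hlt
    refine ih K v (m+1) _ _ _ _ _ (by push_cast; omega)
      ⟨fun q => if q = pe then s q + li.1 else s q, fun q => if q = pe then c q + 1 else c q,
       ?_, ?_, ?_, ?_, ?_, ?_, ?_, ?_⟩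
    · refine (pvHeapify2_perm _).trans ((hperm.map _).trans ?_)
      rw [List.map_map]
      have heq2 : (List.range K).map ((fun sp : Int × Int => (if sp.2 == ((pe:Nat):Int) then sp.1 + li.1 else sp.1, sp.2)) ∘ fun p => (s p, ((p:Nat):Int)))
          = (List.range K).map (fun p => ((fun q => if q = pe then s q + li.1 else s q) p, ((p:Nat):Int))) := by
        apply List.map_congr_left
        intro q _
        rcases eq_or_ne q pe with rfl | hne
        · simp
        · simp [beq_iff_eq, Nat.cast_inj, hne]
      rw [heq2]
    · rw [hgetD pe hpeK, hcounts, PySem.List.pySetD_natCast, pvSet_map_range _ _ _ _ hpeK]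
      apply List.map_congr_left
      intro q _
      rcases eq_or_ne q pe with rfl | hne
      · simp
      · simp [hne]
    · apply pvPairwise_push3 hrestpw
      intro y hy
      obtain ⟨q, hqK, hqne, rfl⟩ := hrest_ent y hy
      show ((q:Nat):Int) ≠ e.2.1
      rw [he21]
      exact fun h => hqne (Nat.cast_injective h)
    · intro y hy
      rcases pvMem_push3.1 hy with rfl | hy
      · exact ⟨pe, hpeK, by rw [he1, he21, he22]; simp⟩
      · obtain ⟨q, hqK, hqne, rfl⟩ := hrest_ent y hy
        exact ⟨q, hqK, by simp [hqne]⟩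
    · intro q hqK hqv'
      rcases eq_or_ne q pe with rfl | hq
      · apply pvMem_push3.2; left
        rw [he1, he21, he22]; simp
      · have hqv : c q < v := by simpa [hq] using hqv'
        apply pvMem_push3.2; right
        have hqmem : (s q, ((q:Nat):Int), c q) ∈ heapB := hcov q hqK hqv
        rw [hdecomp] at hqmem
        rcases List.mem_append.1 hqmem with hpre | hrest2
        · exact absurd hqv (by simpa using hprefull _ hpre)
        · rcases List.mem_cons.1 hrest2 with heq | hr
          · exfalso; apply hq
            have h21 := congrArg (fun z : Int × Int × Int => z.2.1) heq
            simp only [] at h21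
            rw [he21] at h21
            exact Nat.cast_injective h21
          · simpa [hq] using hr
    · rw [pvSum_map_range]
      have hsplit : ∀ p ∈ Finset.range K, (if p = pe then c p + 1 else c p) = c p + (if p = pe then 1 else 0) := by
        intro p _; split <;> simp
      rw [Finset.sum_congr rfl hsplit, Finset.sum_add_distrib,
        Finset.sum_ite_eq' (Finset.range K) pe (fun _ => (1:Int))]
      rw [← pvSum_map_range, hsum]
      rw [if_pos (Finset.mem_range.2 hpeK)]
      push_cast; ring
    · intro q hqK
      rcases eq_or_ne q pe with rfl | hq
      · simp; omega
      · simp [hq]; exact hle q hqK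
    · rw [hp, he21]

-- the invariant in the non-equal_size case: B's heap is A's heap with counts attached
def pvInvNe (sums : List (Int × Int)) (heapB : List (Int × Int × Int)) (pA pB : List (List Int)) : Prop :=
  heapB.map pvPr = sums ∧ (sums.map Prod.snd).Nodup ∧ sums ≠ [] ∧ pA = pB

theorem pvSnd_push2_perm (x : Int × Int) (l : List (Int × Int)) :
    ((pvPush2 x l).map Prod.snd).Perm (x.2 :: l.map Prod.snd) := by
  simpa using (pvPush2_perm x l).map Prod.snd

theorem pvLoopNe (its : List (Int × Int)) : ∀ sums heapB pA pB,
    pvInvNe sums heapB pA pB →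
    (its.foldl pvStepANe (sums, pA)).2 = (its.foldl (pvStepB none) (heapB, pB)).2 := by
  induction its with
  | nil => intro sums heapB pA pB hInv; exact hInv.2.2.2
  | cons li t ih =>
    intro sums heapB pA pB hInv
    obtain ⟨hmap, hnd, hne, hp⟩ := hInv
    subst hmap
    cases heapB with
    | nil => exact absurd rfl hne
    | cons e hb =>
      simp only [List.foldl_cons]
      have hBstep : pvStepB none (e :: hb, pB) li
          = (pvPush3 (e.1 + li.1, e.2.1, e.2.2 + 1) hb, pvAppendAt pB e.2.1 li.2) := rfl
      have hAstep : pvStepANe ((e :: hb).map pvPr, pA) li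
          = (pvPush2 ((pvPr e).1 + li.1, (pvPr e).2) (hb.map pvPr), pvAppendAt pA (pvPr e).2 li.2) := rfl
      rw [hAstep, hBstep]
      have hkeys : ∀ y ∈ hb, y.2.1 ≠ e.2.1 := by
        intro y hy heq
        have : ((e :: hb).map pvPr).map Prod.snd = e.2.1 :: hb.map (fun z => z.2.1) := by
          simp [pvPr, Function.comp]
        rw [this] at hnd
        rw [List.nodup_cons] at hnd
        exact hnd.1 (by rw [← heq]; exact List.mem_map_of_mem hy)
      apply ih
      refine ⟨?_, ?_, pvPush2_ne_nil _ _, by rw [hp]; rfl⟩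
      · have := pvMap_pr_push3 (e.1 + li.1, e.2.1, e.2.2 + 1) hb (by simpa using hkeys)
        rw [this]
        rfl
      · have hperm := pvSnd_push2_perm ((pvPr e).1 + li.1, (pvPr e).2) (hb.map pvPr)
        refine hperm.nodup_iff.2 ?_
        have : ((pvPr e).1 + li.1, (pvPr e).2).2 :: (hb.map pvPr).map Prod.snd
            = ((e :: hb).map pvPr).map Prod.snd := by simp [pvPr]
        rw [this]
        exact hnd

theorem pvCeildiv_eq (n k : Int) (hk : 1 ≤ k) :
    pvCeildiv n k = -(PySem.Int.floordiv (-n) k) := by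
  have hq := (PySem.Int.neg_floordiv_neg_eq_iff_of_pos (a := n) (b := k) (q := -(PySem.Int.floordiv (-n) k)) (by omega)).1 rfl
  unfold pvCeildiv
  rw [PySem.Int.floordiv_eq_iff_of_pos (by omega)]
  constructor
  · nlinarith [hq.1, hq.2]
  · nlinarith [hq.1, hq.2]


theorem pvCeildiv_ge (n k : Int) (hk : 1 ≤ k) : n ≤ k * pvCeildiv n k := by
  have hq := PySem.Int.floordiv_eq_iff_of_pos (a := n + k - 1) (b := k) (q := pvCeildiv n k) (by omega)
  have h2 := hq.1 rfl
  nlinarith [h2.1, h2.2]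


theorem pvShort_loop (k : Int) (hk : 0 < k) (xs : List Int) : ∀ (s : Nat) (acc : List (List Int)),
    (s:Int) + xs.length ≤ k →
    acc = (List.range k.toNat).map (fun p => if p < s then [((p:Nat):Int)] else []) →
    (PySem.List.enumerate xs (s:Int)).foldl
      (fun parts iv => pvAppendAt parts (PySem.Int.mod iv.1 k) iv.1) acc
      = (List.range k.toNat).map (fun p => if p < s + xs.length then [((p:Nat):Int)] else []) := by
  induction xs with
  | nil => intro s acc _ hacc; simp [PySem.List.enumerate_nil, hacc]
  | cons x t ih =>
    intro s acc hle hacc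
    rw [PySem.List.enumerate_cons]
    simp only [List.foldl_cons]
    have hsK : s < k.toNat := by
      have h1 : (s:Int) + ((x :: t).length : Int) ≤ k := hle
      rw [List.length_cons] at h1
      push_cast at h1
      omega
    have hmod : PySem.Int.mod ((s:Nat):Int) k = ((s:Nat):Int) := by
      rw [PySem.Int.mod_eq_emod_of_pos hk]
      exact Int.emod_eq_of_lt (by positivity) (by omega)
    have hget : PySem.List.pyGetD acc ((s:Nat):Int) [] = [] := by
      rw [hacc]
      rw [PySem.List.pyGetD_natCast]
      rw [PySem.List.getD_map_range _ _ _ _ hsK]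
      simp
    have hstep : pvAppendAt acc ((s:Nat):Int) ((s:Nat):Int)
        = (List.range k.toNat).map (fun p => if p < s + 1 then [((p:Nat):Int)] else []) := by
      unfold pvAppendAt
      rw [hget, hacc]
      rw [PySem.List.pySetD_natCast]
      rw [pvSet_map_range _ _ _ _ hsK]
      apply List.map_congr_left
      intro q hq
      by_cases h1 : q = s
      · subst h1; simp
      · simp [h1]
        split <;> split <;> first | rfl | omega
    rw [hmod, hstep]
    have hcast : ((s:Int) + 1) = (((s+1 : Nat)):Int) := by push_cast; ring
    rw [hcast]
    have hle' : ((s+1 : Nat):Int) + (t.length : Int) ≤ k := by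
      have h1 : (s:Int) + ((x :: t).length : Int) ≤ k := hle
      rw [List.length_cons] at h1
      push_cast at h1 ⊢
      omega
    rw [ih (s+1) _ hle' rfl]
    have harr : (s+1) + t.length = s + (x :: t).length := by
      rw [List.length_cons]; omega
    rw [harr]


-- ===== VERDICT (by name: the statement is the Claim_ definition above) =====
-- initialisation facts for the main branch
theorem pvRange_cast (k : Int) : PySem.List.pyRange 0 k 1 = (List.range k.toNat).map (fun q => ((q:Nat):Int)) :=
  PySem.List.pyRange_zero k

theorem pvMapConstZero (M : Nat) : (List.range M).map (fun _ => (0:Int)) = List.replicate M 0 := by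
  induction M with
  | zero => simp
  | succ n ih => rw [List.range_succ, List.map_append, ih, List.replicate_succ']; simp

theorem greedy_partition_main_eq (xs : List Int) (k : Int) (hk : 1 ≤ k)
    (hge : ¬ PySem.List.len xs < k) (eq : Bool) :
    greedy_partition xs k eq = greedy_partition_alt xs k eq := by
  unfold greedy_partition greedy_partition_alt
  rw [if_neg hge, if_neg hge]
  have hkK : ((k.toNat : Nat) : Int) = k := Int.toNat_of_nonneg (by omega)
  have hKpos : 1 ≤ k.toNat := by omega
  have hlen : PySem.List.len xs = (xs.length : Int) := by simp [pysem]
  have hlen_items : (PySem.List.sorted2 ((PySem.List.enumerate xs 0).map (fun iv => (iv.2, iv.1)))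
      Prod.fst Prod.snd true).length = xs.length := by
    rw [(PySem.List.sorted2_perm _ _ _ _).length_eq]
    simp [PySem.List.length_enumerate]
  have hL3keys : (((PySem.List.pyRange 0 k 1).map (fun p => ((0:Int), p, (0:Int)))).map
      (fun e => e.2.1)).Nodup := by
    rw [pvRange_cast, List.map_map, List.map_map]
    exact (List.nodup_range).map (fun a b h => Nat.cast_injective h)
  have hL3mem : ∀ y ∈ (PySem.List.pyRange 0 k 1).map (fun p => ((0:Int), p, (0:Int))),
      ∃ q, q < k.toNat ∧ y = ((0:Int), ((q:Nat):Int), (0:Int)) := by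
    intro y hy
    rw [pvRange_cast, List.map_map] at hy
    rcases List.mem_map.1 hy with ⟨q, hq, rfl⟩
    exact ⟨q, List.mem_range.1 hq, rfl⟩
  have hL3mem' : ∀ q, q < k.toNat →
      ((0:Int), ((q:Nat):Int), (0:Int)) ∈ (PySem.List.pyRange 0 k 1).map (fun p => ((0:Int), p, (0:Int))) := by
    intro q hq
    rw [pvRange_cast, List.map_map]
    exact List.mem_map.2 ⟨q, List.mem_range.2 hq, rfl⟩
  have hsums0 : (pvHeapify2 ((PySem.List.pyRange 0 k 1).map (fun i => ((0:Int), i)))).Perm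
      ((List.range k.toNat).map (fun p => ((0:Int), ((p:Nat):Int)))) := by
    refine (pvHeapify2_perm _).trans ?_
    rw [pvRange_cast, List.map_map]
    exact List.Perm.refl _
  cases eq with
  | true =>
    rw [if_pos rfl, if_pos rfl]
    rw [show -(PySem.Int.floordiv (-(PySem.List.len xs)) k) = pvCeildiv (PySem.List.len xs) k from
      (pvCeildiv_eq _ _ hk).symm]
    have hvge : PySem.List.len xs ≤ k * pvCeildiv (PySem.List.len xs) k := pvCeildiv_ge _ _ hk
    have hvpos : 0 ≤ pvCeildiv (PySem.List.len xs) k := by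
      rw [hlen]
      rw [hlen] at hge hvge
      by_contra hneg
      push Not at hneg
      have h1 : k ≤ (xs.length:Int) := not_lt.1 hge
      nlinarith
    refine pvLoopEq _ k.toNat _ 0 _ _ _ _ _ ?_ ?_
    · rw [hlen_items, hkK, ← hlen]
      push_cast
      linarith [hvge]
    · refine ⟨fun _ => 0, fun _ => 0, hsums0, ?_, pvPairwise_heapify3 _ hL3keys, ?_, ?_, ?_, ?_, rfl⟩
      · rw [PySem.List.pyRepeat_singleton, pvMapConstZero]
      · intro y hy
        rcases hL3mem y ((pvHeapify3_perm _).mem_iff.1 hy) with ⟨q, hq, rfl⟩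
        exact ⟨q, hq, rfl⟩
      · intro p hp _
        exact (pvHeapify3_perm _).mem_iff.2 (hL3mem' p hp)
      · rw [pvSum_map_range]; simp
      · intro p _; exact hvpos
  | false =>
    rw [if_neg (by simp), if_neg (by simp)]
    apply pvLoopNe
    refine ⟨?_, ?_, ?_, rfl⟩
    · rw [pvMap_pr_heapify3 _ hL3keys]
      congr 1
      rw [List.map_map]
      rfl
    · refine ((pvHeapify2_perm _).map Prod.snd).nodup_iff.2 ?_
      rw [List.map_map]
      have : (Prod.snd ∘ fun i : Int => ((0:Int), i)) = fun i : Int => i := rfl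
      rw [this, List.map_id']
      exact PySem.List.nodup_pyRange_one 0 k
    · have hlen2 : (pvHeapify2 ((PySem.List.pyRange 0 k 1).map (fun i => ((0:Int), i)))).length = k.toNat := by
        rw [(pvHeapify2_perm _).length_eq, List.length_map, pvRange_cast, List.length_map, List.length_range]
      intro hnil
      rw [hnil] at hlen2
      simp at hlen2
      omega

theorem greedy_partition_short_eq (xs : List Int) (k : Int)
    (hlt : PySem.List.len xs < k) (eq : Bool) :
    greedy_partition xs k eq = greedy_partition_alt xs k eq := by
  have hlen : PySem.List.len xs = (xs.length : Int) := by simp [pysem]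
  rw [hlen] at hlt
  have hk : 0 < k := lt_of_le_of_lt (by positivity) hlt
  simp only [greedy_partition, greedy_partition_alt]
  rw [hlen]
  rw [if_pos hlt, if_pos hlt]
  have hinit : (PySem.List.pyRange 0 k 1).map (fun _ => ([]:List Int))
      = (List.range k.toNat).map (fun p => if p < (0:Nat) then [((p:Nat):Int)] else []) := by
    rw [pvRange_cast, List.map_map]
    apply List.map_congr_left
    intro q _
    simp
  rw [hinit]
  have hstep := pvShort_loop k hk xs 0 _ (by push_cast; omega) rfl
  simp only [Nat.cast_zero, Nat.zero_add] at hstep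
  rw [hstep]
  rw [pvRange_cast, List.map_map]
  apply List.map_congr_left
  intro q hq
  simp only [Function.comp]
  by_cases h : q < xs.length <;> simp [h, Nat.cast_lt]

theorem greedy_partition_spec : Claim_equal_greedy_partition := by
  unfold Claim_equal_greedy_partition
  intro xs k eq hDom hPre
  show greedy_partition xs k eq = greedy_partition_alt xs k eq
  by_cases hlt : PySem.List.len xs < k
  · exact greedy_partition_short_eq xs k hlt eq
  · rcases hPre with hk | ⟨rfl, _⟩
    · exact greedy_partition_main_eq xs k hk hlt eq
    · cases eq <;>
        · simp only [greedy_partition, greedy_partition_alt]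
          rw [if_neg hlt, if_neg hlt]
          simp only [PySem.List.enumerate_nil, List.map_nil]
          rfl
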